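-- pv_equiv track=rewrite | github.com/pdanbi00/algorithm | 백준/Gold/20327. 배열 돌리기 6/배열 돌리기 6.py | operation6
-- ===== SOURCE A (Python) =====
-- def operation6(arr, l):
--     le = len(arr)
--     ans = [[0]*le for _ in range(le)]
--     sub_size = (1 << l)
--     sub_count = le // sub_size
--     for i in range(sub_count):
--         for j in range(sub_count):
--             x1 = i*sub_size
--             y1 = j*sub_size
--             x2 = i*sub_size
--             y2 = (sub_count-1-j)*sub_size
--             for x in range(sub_size):
--                 for y in range(sub_size):
--                     ans[x1+x][y1+y] = arr[x2+x][y2+y]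
--     return ans
-- ===== SOURCE B (Python) =====
-- def operation6(arr, l):
--     le = len(arr)
--     sub_size = 1 << l
--     sub_count = le // sub_size
--     filled = sub_count * sub_size
--     ans = []
--     for r in range(le):
--         if r < filled:
--             chunks = [arr[r][k*sub_size:(k+1)*sub_size] for k in range(sub_count)]
--             row = [v for ch in reversed(chunks) for v in ch] + [0]*(le - filled)
--             ans.append(row)
--         else:
--             ans.append([0]*le)
--     return ans
-- ===== Notes on version B (the rewrite author's own statement) =====
-- stated objective: simpler
-- what changed: A allocates a mutable zero grid and copies cells one by one through four nested index loops; B builds the result row by row, slicing each row into sub_size chunks, reversing the chunk list and concatenating, with zero padding for the uncovered trailing rows/columns.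
import Mathlib
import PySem

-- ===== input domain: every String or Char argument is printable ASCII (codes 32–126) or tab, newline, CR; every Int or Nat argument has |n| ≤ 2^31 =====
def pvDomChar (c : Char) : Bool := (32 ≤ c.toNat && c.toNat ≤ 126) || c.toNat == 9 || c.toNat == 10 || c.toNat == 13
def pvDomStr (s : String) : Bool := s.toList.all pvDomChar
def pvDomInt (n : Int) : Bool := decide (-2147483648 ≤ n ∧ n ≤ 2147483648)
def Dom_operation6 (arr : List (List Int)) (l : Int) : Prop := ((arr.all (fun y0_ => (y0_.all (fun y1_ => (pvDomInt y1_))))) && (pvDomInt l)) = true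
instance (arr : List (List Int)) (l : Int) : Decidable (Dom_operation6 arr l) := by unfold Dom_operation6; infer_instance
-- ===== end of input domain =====

-- B mirrors the sub-blocks by reversing the list of row chunks instead of A's four nested
-- index loops writing into a mutable grid (objective: simpler; return value only, A mutates
-- nothing observable).

-- ===== PORT A =====
-- Python `ans[i][j] = v` (under Pre_ both indices are always in range)
def pySetCell (g : List (List Int)) (i j : Nat) (v : Int) : List (List Int) :=
  g.set i ((g.getD i []).set j v)

def operation6 (arr : List (List Int)) (l : Int) : List (List Int) :=
  let le := arr.length
  let ans := (List.range le).map (fun _ => List.replicate le (0 : Int))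
  let ss := 1 <<< l.toNat           -- Python `1 << l`; Pre_ has 0 ≤ l (negative shift raises)
  let sc := le / ss
  (List.range sc).foldl (fun ans i =>
    (List.range sc).foldl (fun ans j =>
      let x1 := i * ss
      let y1 := j * ss
      let x2 := i * ss
      let y2 := (sc - 1 - j) * ss
      (List.range ss).foldl (fun ans x =>
        (List.range ss).foldl (fun ans y =>
          pySetCell ans (x1 + x) (y1 + y) ((arr.getD (x2 + x) []).getD (y2 + y) 0))
        ans) ans) ans) ans

-- ===== PORT B =====
def operation6_alt (arr : List (List Int)) (l : Int) : List (List Int) :=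
  let le := arr.length
  let ss := 1 <<< l.toNat
  let sc := le / ss
  let filled := sc * ss
  (List.range le).map (fun r =>
    if r < filled then
      -- Python `arr[r][k*ss:(k+1)*ss]`: under Pre_ these slices are in range, = drop/take
      ((((List.range sc).map (fun k => ((arr.getD r []).drop (k * ss)).take ss)).reverse).flatten)
        ++ List.replicate (le - filled) (0 : Int)
    else List.replicate le (0 : Int))

-- ===== PRECONDITION & SPEC =====
-- number of cells per side that A actually fills: (le / 2^l) * 2^l (0 when 2^l > le;
-- the guard only avoids computing a gigantic power for large l and changes no value)
def pvFilled (arr : List (List Int)) (l : Int) : Nat :=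
  if l.toNat ≤ arr.length then (arr.length / (1 <<< l.toNat)) * (1 <<< l.toNat) else 0

-- exactly the inputs where Python A returns: `1 << l` needs l ≥ 0, and every row A reads
-- (the first `filled` many) must have at least `filled` entries, else IndexError
def Pre_operation6 (arr : List (List Int)) (l : Int) : Prop :=
  0 ≤ l ∧ ∀ row ∈ arr.take (pvFilled arr l), pvFilled arr l ≤ row.length
instance (arr : List (List Int)) (l : Int) : Decidable (Pre_operation6 arr l) := by
  unfold Pre_operation6; infer_instance

def pvWitness_operation6 : List (List Int) × Int := ([[1, 2], [3, 4]], 1)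

def Spec_operation6 (arr : List (List Int)) (l : Int) (out : List (List Int)) : Prop := out = operation6_alt arr l
instance (arr : List (List Int)) (l : Int) (out : List (List Int)) : Decidable (Spec_operation6 arr l out) := by unfold Spec_operation6; infer_instance

-- ===== CLAIM (what is proved, stated in full; the proofs are below) =====
def Claim_equal_operation6 : Prop := ∀ (arr : List (List Int)) (l : Int), Dom_operation6 arr l → Pre_operation6 arr l → Spec_operation6 arr l (operation6 arr l)

-- ===== LEMMAS AND PROOFS =====

def cell (g : List (List Int)) (r c : Nat) : Int := (g.getD r []).getD c 0
def Shape (g : List (List Int)) (L : Nat) : Prop :=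
  g.length = L ∧ ∀ row ∈ g, row.length = L
lemma getD_set {α : Type} (l : List α) (i j : Nat) (v d : α) :
    (l.set i v).getD j d = if j = i ∧ i < l.length then v else l.getD j d := by
  simp [List.getD_eq_getElem?_getD, List.getElem?_set]
  split_ifs <;> simp_all

lemma shape_set2 {g : List (List Int)} {L i j : Nat} {v : Int} (h : Shape g L) :
    Shape (pySetCell g i j v) L := by
  obtain ⟨h1, h2⟩ := h
  by_cases hi : i < g.length
  · refine ⟨by simp [pySetCell, h1], ?_⟩
    intro row hr
    rcases List.mem_or_eq_of_mem_set hr with h | rfl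
    · exact h2 _ h
    · simp only [List.length_set]
      rw [List.getD_eq_getElem _ _ hi]; exact h2 _ (List.getElem_mem hi)
  · unfold pySetCell
    rw [List.set_eq_of_length_le (Nat.le_of_not_lt hi)]
    exact ⟨h1, h2⟩

lemma cell_set2 {g : List (List Int)} {L i j : Nat} (v : Int)
    (hSh : Shape g L) (hi : i < L) (hj : j < L) :
    ∀ r c, cell (pySetCell g i j v) r c = if r = i ∧ c = j then v else cell g r c := by
  intro r c
  obtain ⟨h1, h2⟩ := hSh
  have hig : i < g.length := h1 ▸ hi
  have hrow : (g.getD i []).length = L := by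
    rw [List.getD_eq_getElem _ _ hig]; exact h2 _ (List.getElem_mem hig)
  unfold cell pySetCell
  rw [getD_set]
  by_cases hr : r = i
  · subst hr
    simp only [hig, and_true, true_and, if_pos trivial]
    rw [getD_set, hrow]
    by_cases hc : c = j <;> simp [hc, hj]
  · simp [hr]

lemma foldY (f : Nat → Int) (g : List (List Int)) (L R c0 n : Nat)
    (hSh : Shape g L) (hR : R < L) (hn : c0 + n ≤ L) :
    Shape ((List.range n).foldl (fun a y => pySetCell a R (c0 + y) (f y)) g) L ∧
    ∀ r c, cell ((List.range n).foldl (fun a y => pySetCell a R (c0 + y) (f y)) g) r c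
      = if r = R ∧ c0 ≤ c ∧ c < c0 + n then f (c - c0) else cell g r c := by
  induction n with
  | zero =>
    simp only [List.range_zero, List.foldl_nil]
    exact ⟨hSh, fun r c => (if_neg (by omega)).symm⟩
  | succ n ih =>
    obtain ⟨ihS, ihC⟩ := ih (by omega)
    rw [List.range_succ, List.foldl_append]
    simp only [List.foldl_cons, List.foldl_nil]
    refine ⟨shape_set2 ihS, ?_⟩
    intro r c
    rw [cell_set2 (f n) ihS hR (by omega), ihC]
    split_ifs <;> first | rfl | omega | (congr 1; omega)

lemma foldX (arr g : List (List Int)) (L ss x1 y1 x2 y2 m : Nat)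
    (hSh : Shape g L) (hx : x1 + m ≤ L) (hy : y1 + ss ≤ L) :
    Shape ((List.range m).foldl (fun a x =>
        (List.range ss).foldl (fun a y =>
          pySetCell a (x1 + x) (y1 + y) ((arr.getD (x2 + x) []).getD (y2 + y) 0)) a) g) L ∧
    ∀ r c, cell ((List.range m).foldl (fun a x =>
        (List.range ss).foldl (fun a y =>
          pySetCell a (x1 + x) (y1 + y) ((arr.getD (x2 + x) []).getD (y2 + y) 0)) a) g) r c
      = if x1 ≤ r ∧ r < x1 + m ∧ y1 ≤ c ∧ c < y1 + ss
        then cell arr (x2 + (r - x1)) (y2 + (c - y1)) else cell g r c := by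
  induction m with
  | zero =>
    simp only [List.range_zero, List.foldl_nil]
    exact ⟨hSh, fun r c => (if_neg (by omega)).symm⟩
  | succ m ih =>
    obtain ⟨ihS, ihC⟩ := ih (by omega)
    rw [List.range_succ, List.foldl_append]
    simp only [List.foldl_cons, List.foldl_nil]
    have hstep := foldY (fun y => (arr.getD (x2 + m) []).getD (y2 + y) 0) _ L (x1 + m) y1 ss
      ihS (by omega) (by omega)
    refine ⟨hstep.1, ?_⟩
    intro r c
    rw [hstep.2, ihC]
    split_ifs <;> first | rfl | omega | (show cell arr _ _ = cell arr _ _; unfold cell; congr 2; omega)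

lemma foldJ (arr g : List (List Int)) (L ss sc i k : Nat) (hss : 0 < ss)
    (hSh : Shape g L) (hk : k ≤ sc) (hfill : sc * ss ≤ L) (hi : (i + 1) * ss ≤ L) :
    Shape ((List.range k).foldl (fun a j =>
        (List.range ss).foldl (fun a x =>
          (List.range ss).foldl (fun a y =>
            pySetCell a (i * ss + x) (j * ss + y)
              ((arr.getD (i * ss + x) []).getD ((sc - 1 - j) * ss + y) 0)) a) a) g) L ∧
    ∀ r c, cell ((List.range k).foldl (fun a j =>
        (List.range ss).foldl (fun a x =>
          (List.range ss).foldl (fun a y =>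
            pySetCell a (i * ss + x) (j * ss + y)
              ((arr.getD (i * ss + x) []).getD ((sc - 1 - j) * ss + y) 0)) a) a) g) r c
      = if i * ss ≤ r ∧ r < (i + 1) * ss ∧ c < k * ss
        then cell arr r ((sc - 1 - c / ss) * ss + c % ss) else cell g r c := by
  have e1 : (i + 1) * ss = i * ss + ss := Nat.succ_mul i ss
  induction k with
  | zero =>
    simp only [List.range_zero, List.foldl_nil]
    exact ⟨hSh, fun r c => (if_neg (by omega)).symm⟩
  | succ k ih =>
    have e2 : (k + 1) * ss = k * ss + ss := Nat.succ_mul k ss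
    have e3 : (k + 1) * ss ≤ sc * ss := Nat.mul_le_mul_right ss hk
    obtain ⟨ihS, ihC⟩ := ih (by omega)
    rw [List.range_succ, List.foldl_append]
    simp only [List.foldl_cons, List.foldl_nil]
    have hstep := foldX arr _ L ss (i * ss) (k * ss) (i * ss) ((sc - 1 - k) * ss) ss
      ihS (by omega) (by omega)
    refine ⟨hstep.1, ?_⟩
    intro r c
    rw [hstep.2, ihC]
    by_cases hband : i * ss ≤ r ∧ r < i * ss + ss
    · by_cases hnew : k * ss ≤ c ∧ c < k * ss + ss
      · have hdiv : c / ss = k := Nat.div_eq_of_lt_le hnew.1 (by rw [Nat.succ_mul]; omega)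
        have hmod := Nat.mod_add_div c ss
        rw [hdiv, Nat.mul_comm] at hmod
        rw [if_pos ⟨hband.1, hband.2, hnew.1, hnew.2⟩, if_pos ⟨hband.1, by omega, by omega⟩,
            hdiv]
        unfold cell
        congr 3 <;> omega
      · by_cases hold : c < k * ss
        · rw [if_neg (by omega), if_pos ⟨hband.1, by omega, hold⟩, if_pos ⟨hband.1, by omega, by omega⟩]
        · rw [if_neg (by omega), if_neg (by omega), if_neg (by omega)]
    · rw [if_neg (by omega), if_neg (by omega), if_neg (by omega)]

lemma foldI (arr g : List (List Int)) (L ss sc q : Nat) (hss : 0 < ss)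
    (hSh : Shape g L) (hq : q ≤ sc) (hfill : sc * ss ≤ L) :
    Shape ((List.range q).foldl (fun a i =>
        (List.range sc).foldl (fun a j =>
          (List.range ss).foldl (fun a x =>
            (List.range ss).foldl (fun a y =>
              pySetCell a (i * ss + x) (j * ss + y)
                ((arr.getD (i * ss + x) []).getD ((sc - 1 - j) * ss + y) 0)) a) a) a) g) L ∧
    ∀ r c, cell ((List.range q).foldl (fun a i =>
        (List.range sc).foldl (fun a j =>
          (List.range ss).foldl (fun a x =>
            (List.range ss).foldl (fun a y =>
              pySetCell a (i * ss + x) (j * ss + y)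
                ((arr.getD (i * ss + x) []).getD ((sc - 1 - j) * ss + y) 0)) a) a) a) g) r c
      = if r < q * ss ∧ c < sc * ss
        then cell arr r ((sc - 1 - c / ss) * ss + c % ss) else cell g r c := by
  induction q with
  | zero =>
    simp only [List.range_zero, List.foldl_nil]
    exact ⟨hSh, fun r c => (if_neg (by omega)).symm⟩
  | succ q ih =>
    have e1 : (q + 1) * ss = q * ss + ss := Nat.succ_mul q ss
    have e2 : (q + 1) * ss ≤ sc * ss := Nat.mul_le_mul_right ss hq
    obtain ⟨ihS, ihC⟩ := ih (by omega)
    rw [List.range_succ, List.foldl_append]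
    have hstep := foldJ arr _ L ss sc q sc hss ihS le_rfl hfill (by omega)
    simp only [List.foldl_cons, List.foldl_nil]
    refine ⟨hstep.1, ?_⟩
    intro r c
    rw [hstep.2, ihC]
    split_ifs <;> first | rfl | omega

lemma B_chunks (row : List Int) (ss : Nat) (hss : 0 < ss) :
    ∀ m : Nat, m * ss ≤ row.length →
    ((((List.range m).map (fun k => (row.drop (k * ss)).take ss)).reverse).flatten).length = m * ss ∧
    ∀ c < m * ss, ((((List.range m).map (fun k => (row.drop (k * ss)).take ss)).reverse).flatten).getD c 0
      = row.getD ((m - 1 - c / ss) * ss + c % ss) 0 := by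
  intro m
  induction m with
  | zero => intro _; simp
  | succ m ih =>
    intro hlen
    have em : (m + 1) * ss = m * ss + ss := Nat.succ_mul m ss
    obtain ⟨ihL, ihC⟩ := ih (by omega)
    rw [List.range_succ, List.map_append, List.reverse_append]
    simp only [List.map_cons, List.map_nil, List.reverse_cons, List.reverse_nil,
      List.nil_append, List.cons_append, List.flatten_cons]
    have hchunk : ((row.drop (m * ss)).take ss).length = ss := by
      simp [List.length_take, List.length_drop]; omega
    have hget : ∀ c < ss, ((row.drop (m * ss)).take ss).getD c 0 = row.getD (m * ss + c) 0 := by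
      intro c hc
      rw [List.getD_eq_getElem _ _ (by omega), List.getD_eq_getElem _ _ (by omega)]
      simp [List.getElem_take, List.getElem_drop]
    constructor
    · simp [List.length_append, ihL, hchunk]; omega
    · intro c hc
      by_cases hcs : c < ss
      · rw [List.getD_append _ _ _ _ (by omega), hget c hcs]
        have hd : c / ss = 0 := Nat.div_eq_of_lt hcs
        have hm : c % ss = c := Nat.mod_eq_of_lt hcs
        rw [hd, hm]
        simp
      · have hca : (List.take ss (List.drop (m * ss) row)).length ≤ c := by rw [hchunk]; omega
        rw [List.getD_append_right _ _ _ _ hca, hchunk, ihC (c - ss) (by omega)]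
        have h1 : c = (c - ss) + ss := by omega
        have hdiv : c / ss = (c - ss) / ss + 1 := by
          conv_lhs => rw [h1]
          rw [Nat.add_div_right _ hss]
        have hmod : c % ss = (c - ss) % ss := by
          conv_lhs => rw [h1]
          rw [Nat.add_mod_right]
        rw [hdiv, hmod]
        have h2 : m + 1 - 1 - ((c - ss) / ss + 1) = m - 1 - (c - ss) / ss := by omega
        rw [h2]

lemma zero_grid (le : Nat) :
    Shape ((List.range le).map (fun _ => List.replicate le (0 : Int))) le ∧
    ∀ r c, cell ((List.range le).map (fun _ => List.replicate le (0 : Int))) r c = 0 := by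
  constructor
  · refine ⟨by simp, ?_⟩
    intro row hr
    rcases List.mem_map.1 hr with ⟨_, _, rfl⟩
    simp
  · intro r c
    simp only [cell, List.getD_eq_getElem?_getD]
    simp [List.getElem?_replicate]
    split_ifs <;> simp

lemma opA_char (arr : List (List Int)) (l : Int) :
    Shape (operation6 arr l) arr.length ∧
    ∀ r c, cell (operation6 arr l) r c
      = if r < (arr.length / (1 <<< l.toNat)) * (1 <<< l.toNat) ∧
           c < (arr.length / (1 <<< l.toNat)) * (1 <<< l.toNat)
        then cell arr r (((arr.length / (1 <<< l.toNat)) - 1 - c / (1 <<< l.toNat)) * (1 <<< l.toNat)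
                          + c % (1 <<< l.toNat)) else 0 := by
  have hss : 0 < 1 <<< l.toNat := by
    rw [Nat.one_shiftLeft]; exact Nat.two_pow_pos _
  obtain ⟨h0S, h0C⟩ := zero_grid arr.length
  have h := foldI arr ((List.range arr.length).map (fun _ => List.replicate arr.length (0 : Int)))
    arr.length (1 <<< l.toNat) (arr.length / (1 <<< l.toNat)) (arr.length / (1 <<< l.toNat))
    hss h0S le_rfl (Nat.div_mul_le_self _ _)
  refine ⟨h.1, fun r c => ?_⟩
  have h2 : cell (operation6 arr l) r c = _ := h.2 r c
  rw [h2]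
  split_ifs with hcond
  · rfl
  · exact h0C r c
lemma pvFilled_eq (arr : List (List Int)) (l : Int) :
    pvFilled arr l = (arr.length / (1 <<< l.toNat)) * (1 <<< l.toNat) := by
  unfold pvFilled
  split_ifs with h
  · rfl
  · have hlt : arr.length < 1 <<< l.toNat := by
      rw [Nat.one_shiftLeft]
      calc arr.length < 2 ^ arr.length := Nat.lt_two_pow_self
        _ ≤ 2 ^ l.toNat := Nat.pow_le_pow_right (by norm_num) (by omega)
    rw [Nat.div_eq_of_lt hlt, Nat.zero_mul]

lemma getElem_eq_cell (g : List (List Int)) (r c : Nat) (h1 : r < g.length)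
    (h2 : c < g[r].length) : g[r][c] = cell g r c := by
  unfold cell
  rw [List.getD_eq_getElem _ _ h1, List.getD_eq_getElem _ _ h2]

lemma opA_eq_opB (arr : List (List Int)) (l : Int) (hPre : Pre_operation6 arr l) :
    operation6 arr l = operation6_alt arr l := by
  have hss : 0 < 1 <<< l.toNat := by rw [Nat.one_shiftLeft]; exact Nat.two_pow_pos _
  obtain ⟨⟨hAlen, hArows⟩, hAcell⟩ := opA_char arr l
  have hfl : (arr.length / (1 <<< l.toNat)) * (1 <<< l.toNat) ≤ arr.length :=
    Nat.div_mul_le_self _ _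
  have hpre2 : ∀ r < (arr.length / (1 <<< l.toNat)) * (1 <<< l.toNat),
      (arr.length / (1 <<< l.toNat)) * (1 <<< l.toNat) ≤ (arr.getD r []).length := by
    intro r hr
    have hrle : r < arr.length := by omega
    have hmem : arr[r] ∈ arr.take (pvFilled arr l) := by
      rw [pvFilled_eq]
      have : (arr.take ((arr.length / (1 <<< l.toNat)) * (1 <<< l.toNat)))[r]'(by
        simp [List.length_take]; omega) = arr[r] := List.getElem_take
      exact this ▸ List.getElem_mem _
    have := hPre.2 _ hmem
    rw [pvFilled_eq] at this
    rw [List.getD_eq_getElem _ _ hrle]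
    exact this
  have hBlen : (operation6_alt arr l).length = arr.length := by
    simp [operation6_alt]
  apply List.ext_getElem (by rw [hAlen, hBlen])
  intro r h1 h2
  have hr : r < arr.length := by omega
  have hBr : (operation6_alt arr l)[r] =
      if r < (arr.length / (1 <<< l.toNat)) * (1 <<< l.toNat) then
        ((((List.range (arr.length / (1 <<< l.toNat))).map
            (fun k => ((arr.getD r []).drop (k * (1 <<< l.toNat))).take (1 <<< l.toNat))).reverse).flatten)
          ++ List.replicate (arr.length - (arr.length / (1 <<< l.toNat)) * (1 <<< l.toNat)) (0 : Int)
      else List.replicate arr.length (0 : Int) := by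
    simp [operation6_alt]
  have hArlen : (operation6 arr l)[r].length = arr.length :=
    hArows _ (List.getElem_mem h1)
  apply List.ext_getElem
  · rw [hArlen, hBr]
    split_ifs with hrf
    · obtain ⟨hL, _⟩ := B_chunks (arr.getD r []) (1 <<< l.toNat) hss
        (arr.length / (1 <<< l.toNat)) (hpre2 r hrf)
      rw [List.length_append, hL, List.length_replicate]
      omega
    · simp
  · intro c hc1 hc2
    have hcle : c < arr.length := by rw [hArlen] at hc1; exact hc1
    rw [getElem_eq_cell _ _ _ h1 hc1, hAcell, getElem_eq_cell _ _ _ h2 hc2]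
    have hcellB : cell (operation6_alt arr l) r c =
        ((operation6_alt arr l)[r]).getD c 0 := by
      unfold cell
      rw [List.getD_eq_getElem _ _ h2]
    rw [hcellB, hBr]
    by_cases hrf : r < (arr.length / (1 <<< l.toNat)) * (1 <<< l.toNat)
    · obtain ⟨hL, hC⟩ := B_chunks (arr.getD r []) (1 <<< l.toNat) hss
        (arr.length / (1 <<< l.toNat)) (hpre2 r hrf)
      rw [if_pos hrf]
      by_cases hcf : c < (arr.length / (1 <<< l.toNat)) * (1 <<< l.toNat)
      · rw [List.getD_append _ _ _ _ (by rw [hL]; omega), hC c hcf,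
          if_pos ⟨hrf, hcf⟩]
        rfl
      · rw [List.getD_append_right _ _ _ _ (by rw [hL]; omega), hL,
          if_neg (by omega)]
        rw [List.getD_eq_getElem _ _ (by rw [List.length_replicate]; omega),
          List.getElem_replicate]
    · rw [if_neg hrf, if_neg (by omega)]
      rw [List.getD_eq_getElem _ _ (by rw [List.length_replicate]; omega),
        List.getElem_replicate]

-- ===== VERDICT (by name: the statement is the Claim_ definition above) =====
theorem operation6_spec : Claim_equal_operation6 := by
  intro arr l _ hPre
  exact opA_eq_opB arr l hPre
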